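-- pv_equiv track=rewrite | github.com/copslock/android_platform_tools_test_connectivity | acts/tests/google/fuchsia/bt/command_input.py | complete_btc_pair
-- ===== SOURCE A (Python) =====
-- def complete_btc_pair(text, line, begidx, endidx):
--     """ Provides auto-complete for btc_pair cmd.
--
--     See Cmd module for full description.
--     """
--     arg_completion = len(line.split(" ")) - 1
--     pairing_security_level_options = ['ENCRYPTED', 'AUTHENTICATED', 'NONE']
--     non_bondable_options = ['BONDABLE', 'NON_BONDABLE', 'NONE']
--     transport_options = ['BREDR', 'LE']
--     if arg_completion == 1:
--         if not text:
--             completions = pairing_security_level_options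
--         else:
--             completions = [
--                 s for s in pairing_security_level_options
--                 if s.startswith(text)
--             ]
--         return completions
--     if arg_completion == 2:
--         if not text:
--             completions = non_bondable_options
--         else:
--             completions = [
--                 s for s in non_bondable_options if s.startswith(text)
--             ]
--         return completions
--     if arg_completion == 3:
--         if not text:
--             completions = transport_options
--         else:
--             completions = [
--                 s for s in transport_options if s.startswith(text)
--             ]
--         return completions
-- ===== SOURCE B (Python) =====
-- def _walk(rest, levels):
--     # Descend one option level per remaining word; the level reached when one
--     # word remains is the one being completed. Runs out -> no completion set.
--     if not rest or not levels:
--         return None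
--     if len(rest) == 1:
--         return levels[0]
--     return _walk(rest[1:], levels[1:])
--
--
-- def complete_btc_pair(text, line, begidx, endidx):
--     levels = [['ENCRYPTED', 'AUTHENTICATED', 'NONE'],
--               ['BONDABLE', 'NON_BONDABLE', 'NONE'],
--               ['BREDR', 'LE']]
--     opts = _walk(line.split(" ")[1:], levels)
--     if opts is None:
--         return None
--     k = len(text)
--     out = []
--     for opt in opts:
--         if opt[:k] == text:
--             out.append(opt)
--     return out
-- ===== Notes on version B (the rewrite author's own statement) =====
-- stated objective: alternative
-- what changed: Instead of computing an argument index and selecting one of three fixed branches, B recursively co-walks the words after the command against the list of option levels (one level per word) and then filters the reached level with one explicit accumulator loop comparing the prefix slice opt[:len(text)] == text, with no empty-text special case.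
import Mathlib
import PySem

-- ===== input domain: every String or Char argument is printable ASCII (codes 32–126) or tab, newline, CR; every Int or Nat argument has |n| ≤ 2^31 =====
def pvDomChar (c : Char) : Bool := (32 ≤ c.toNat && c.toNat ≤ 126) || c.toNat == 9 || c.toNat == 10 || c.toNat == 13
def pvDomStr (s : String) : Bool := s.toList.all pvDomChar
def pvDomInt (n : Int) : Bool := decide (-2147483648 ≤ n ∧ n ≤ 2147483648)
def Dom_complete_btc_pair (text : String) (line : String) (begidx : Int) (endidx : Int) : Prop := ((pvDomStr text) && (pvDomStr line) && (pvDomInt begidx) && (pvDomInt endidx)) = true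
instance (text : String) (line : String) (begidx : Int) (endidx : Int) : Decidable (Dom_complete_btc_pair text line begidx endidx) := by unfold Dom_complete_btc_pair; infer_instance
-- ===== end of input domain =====

-- B walks the words after the command against the option-level list recursively (one level per
-- word) and filters the reached level with one accumulator loop comparing opt[:len(text)] == text
-- (objective: alternative decomposition, same cost).

-- ===== PORT A =====
def complete_btc_pair (text : String) (line : String) (begidx : Int) (endidx : Int) : Option (List String) :=
  let arg_completion : Int := (((PySem.Str.split? line " ").getD []).length : Int) - 1
  let pairing_security_level_options : List String := ["ENCRYPTED", "AUTHENTICATED", "NONE"]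
  let non_bondable_options : List String := ["BONDABLE", "NON_BONDABLE", "NONE"]
  let transport_options : List String := ["BREDR", "LE"]
  if arg_completion = 1 then
    some (if text = "" then pairing_security_level_options
          else pairing_security_level_options.filter (fun s => PySem.Str.startswith s text))
  else if arg_completion = 2 then
    some (if text = "" then non_bondable_options
          else non_bondable_options.filter (fun s => PySem.Str.startswith s text))
  else if arg_completion = 3 then
    some (if text = "" then transport_options
          else transport_options.filter (fun s => PySem.Str.startswith s text))
  else none  -- Python falls off the end: returns None

-- ===== PORT B =====
-- _walk from Source B: pair the remaining words against the levels, one step each.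
def pvWalk (rest : List String) (levels : List (List String)) : Option (List String) :=
  match rest, levels with
  | [], _ => none
  | _ :: _, [] => none
  | [_], l :: _ => some l
  | _ :: rs, _ :: ls => pvWalk rs ls

def complete_btc_pair_alt (text : String) (line : String) (begidx : Int) (endidx : Int) : Option (List String) :=
  let levels : List (List String) := [["ENCRYPTED", "AUTHENTICATED", "NONE"],
                                      ["BONDABLE", "NON_BONDABLE", "NONE"],
                                      ["BREDR", "LE"]]
  match pvWalk (PySem.List.slice ((PySem.Str.split? line " ").getD []) (some 1) none) levels with
  | none => none
  | some opts =>
      let k : Int := (text.length : Int)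
      some (opts.foldl (fun out opt =>
        if PySem.Str.slice opt none (some k) = text then out ++ [opt] else out) [])

-- ===== PRECONDITION & SPEC =====
def Spec_complete_btc_pair (text : String) (line : String) (begidx : Int) (endidx : Int) (out : Option (List String)) : Prop := out = complete_btc_pair_alt text line begidx endidx
instance (text : String) (line : String) (begidx : Int) (endidx : Int) (out : Option (List String)) : Decidable (Spec_complete_btc_pair text line begidx endidx out) := by unfold Spec_complete_btc_pair; infer_instance

-- ===== CLAIM (what is proved, stated in full; the proofs are below) =====
def Claim_equal_complete_btc_pair : Prop := ∀ (text : String) (line : String) (begidx : Int) (endidx : Int), Dom_complete_btc_pair text line begidx endidx → Spec_complete_btc_pair text line begidx endidx (complete_btc_pair text line begidx endidx)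

-- ===== LEMMAS AND PROOFS =====

-- B's slice-prefix test coincides with Python's startswith.
theorem pvSlice_eq_startswith (s t : String) :
    (PySem.Str.slice s none (some (t.length : Int)) = t) ↔ PySem.Str.startswith s t = true := by
  rw [PySem.Str.startswith, PySem.Chars.startswith, List.isPrefixOf_iff_prefix,
    List.prefix_iff_eq_take]
  constructor
  · intro h
    have := congrArg String.toList h
    rw [PySem.Str.toList_slice] at this
    simpa [PySem.Chars.slice, PySem.List.slice_to_natCast, String.length_toList] using this.symm
  · intro h
    apply String.toList_injective
    rw [PySem.Str.toList_slice]
    simpa [PySem.Chars.slice, PySem.List.slice_to_natCast, String.length_toList] using h.symm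

-- B's accumulator loop over a level equals A's filtered/unfiltered list for that level.
theorem pvLoop_eq (text : String) (opts : List String) :
    opts.foldl (fun out opt =>
        if PySem.Str.slice opt none (some ((text.length : Nat) : Int)) = text then out ++ [opt]
        else out) [] =
      (if text = "" then opts else opts.filter (fun s => PySem.Str.startswith s text)) := by
  have hstep : opts.foldl (fun out opt =>
        if PySem.Str.slice opt none (some ((text.length : Nat) : Int)) = text then out ++ [opt]
        else out) [] =
      opts.foldl (fun out opt =>
        if PySem.Str.startswith opt text = true then out ++ [id opt] else out) [] := by
    apply PySem.List.foldl_congr_mem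
    intro out opt _
    by_cases h : PySem.Str.startswith opt text = true
    · rw [if_pos h, if_pos ((pvSlice_eq_startswith opt text).2 h)]; rfl
    · rw [if_neg h, if_neg (fun hc => h ((pvSlice_eq_startswith opt text).1 hc))]
  rw [hstep, PySem.List.foldl_append_if, List.map_id, List.nil_append]
  by_cases ht : text = ""
  · subst ht
    simp [PySem.Str.startswith, PySem.Chars.startswith]
  · rw [if_neg ht]

-- ===== VERDICT (by name: the statement is the Claim_ definition above) =====
theorem complete_btc_pair_spec : Claim_equal_complete_btc_pair := by
  intro text line begidx endidx _
  unfold Spec_complete_btc_pair complete_btc_pair complete_btc_pair_alt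
  rw [PySem.List.slice_from_one]
  generalize ((PySem.Str.split? line " ").getD []) = r
  rcases r with _ | ⟨c, _ | ⟨a, _ | ⟨b, _ | ⟨d, _ | ⟨e, t⟩⟩⟩⟩⟩ <;>
    simp only [List.tail, pvWalk, List.length, pvLoop_eq] <;>
    push_cast <;> (try split_ifs) <;> first | rfl | omega
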